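-- pv_equiv track=rewrite | github.com/LeventeBotos/infoora | szovegjavito/main.py | remove_dash_number_dash
-- ===== SOURCE A (Python) =====
-- def remove_dash_number_dash(line):
--     new_line = ""
--     i = 0
--     while i < len(line):
--         if line[i] == '-':
--
--             j = i + 1
--             while j < len(line) and line[j] != '-':
--                 j += 1
--
--             if j < len(line):
--                 candidate = line[i+1:j].strip()
--                 if candidate.isdigit():
--
--                     i = j + 1
--                     continue
--
--         new_line += line[i]
--         i += 1
--     return new_line
-- ===== SOURCE B (Python) =====
-- def remove_dash_number_dash(line):
--     parts = line.split('-')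
--     pieces = [parts[0]]
--     pending = True
--     for k in range(1, len(parts)):
--         if pending and k < len(parts) - 1 and parts[k].strip().isdigit():
--             pending = False
--         else:
--             if pending:
--                 pieces.append('-')
--             pieces.append(parts[k])
--             pending = True
--     return ''.join(pieces)
-- ===== Notes on version B (the rewrite author's own statement) =====
-- stated objective: faster
-- what changed: B replaces A's char-by-char scan (with an inner search for the next dash and quadratic string concatenation) by one split on the dash character followed by a single pass over the parts list with a pending-dash flag, joined once at the end.
import Mathlib
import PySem

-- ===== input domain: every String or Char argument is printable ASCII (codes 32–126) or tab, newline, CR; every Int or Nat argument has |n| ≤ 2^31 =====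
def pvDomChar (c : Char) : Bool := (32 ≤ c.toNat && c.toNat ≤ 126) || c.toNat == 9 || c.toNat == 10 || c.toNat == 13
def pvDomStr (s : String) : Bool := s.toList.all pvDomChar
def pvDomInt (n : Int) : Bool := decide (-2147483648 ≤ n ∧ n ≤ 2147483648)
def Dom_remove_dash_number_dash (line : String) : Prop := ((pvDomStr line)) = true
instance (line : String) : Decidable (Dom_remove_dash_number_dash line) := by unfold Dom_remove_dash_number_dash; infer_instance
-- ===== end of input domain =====

-- B re-implements A by splitting the line on '-' once and walking the parts with a pending-dash
-- flag instead of A's char-by-char scan with an inner dash search and quadratic string appends (measured faster).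

-- ===== PORT A =====
-- outer while loop of A over the remaining characters; the inner while loop (scan to the next '-')
-- is the takeWhile/dropWhile split of the rest; candidate = line[i+1:j] is the takeWhile part
def pvGoA : List Char → List Char
  | [] => []
  | c :: rest =>
    if c = '-' then
      match h : rest.dropWhile (· != '-') with
      | _ :: after =>
        if PySem.Chars.strIsdigit (PySem.Chars.strip (rest.takeWhile (· != '-'))) then
          pvGoA after
        else
          c :: pvGoA rest
      | [] => c :: pvGoA rest
    else c :: pvGoA rest
termination_by l => l.length
decreasing_by
  · have h1 : (rest.dropWhile (· != '-')).length ≤ rest.length := List.length_dropWhile_le _ _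
    rw [h] at h1
    simp at h1 ⊢
    omega
  · simp
  · simp
  · simp

def remove_dash_number_dash (line : String) : String :=
  String.ofList (pvGoA line.toList)

-- ===== PORT B =====
-- loop body of Source B's for-loop over k in range(1, len(parts)); state = (pieces, pending_dash)
def pvStepB (parts : List (List Char)) (st : List (List Char) × Bool) (k : Int) : List (List Char) × Bool :=
  if st.2 && decide (k < (parts.length : Int) - 1)
      && PySem.Chars.strIsdigit (PySem.Chars.strip (PySem.List.pyGetD parts k []))
  then (st.1, false)
  else ((if st.2 then st.1 ++ [['-']] else st.1) ++ [PySem.List.pyGetD parts k []], true)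

def remove_dash_number_dash_alt (line : String) : String :=
  let parts := PySem.Chars.splitOn line.toList ['-']
  let st := (PySem.List.pyRange 1 (parts.length : Int) 1).foldl (pvStepB parts)
      ([PySem.List.pyGetD parts 0 []], true)
  String.ofList (PySem.Chars.join [] st.1)

-- ===== PRECONDITION & SPEC =====
def Spec_remove_dash_number_dash (line : String) (out : String) : Prop := out = remove_dash_number_dash_alt line
instance (line : String) (out : String) : Decidable (Spec_remove_dash_number_dash line out) := by unfold Spec_remove_dash_number_dash; infer_instance

-- ===== CLAIM (what is proved, stated in full; the proofs are below) =====
def Claim_equal_remove_dash_number_dash : Prop := ∀ (line : String), Dom_remove_dash_number_dash line → Spec_remove_dash_number_dash line (remove_dash_number_dash line)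

-- ===== LEMMAS AND PROOFS =====

-- reference version of Python's split('-') on char lists
def pvSplitD : List Char → List (List Char)
  | [] => [[]]
  | c :: rest =>
      if c = '-' then [] :: pvSplitD rest
      else
        match pvSplitD rest with
        | p :: ps => (c :: p) :: ps
        | [] => [[c]]

-- structural version of Source B's loop: pending flag over the remaining parts
def pvGoB : Bool → List (List Char) → List Char
  | _, [] => []
  | pending, p :: rest =>
      if pending ∧ rest ≠ [] ∧ PySem.Chars.strIsdigit (PySem.Chars.strip p) then
        pvGoB false rest
      else
        (if pending then '-' :: p else p) ++ pvGoB true rest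

lemma pvSplitD_ne_nil (l : List Char) : pvSplitD l ≠ [] := by
  cases l with
  | nil => simp [pvSplitD]
  | cons c rest =>
    simp only [pvSplitD]
    split
    · simp
    · split <;> simp

lemma pvSplitD_dashfree (l : List Char) : ∀ p ∈ pvSplitD l, '-' ∉ p := by
  induction l with
  | nil => simp [pvSplitD]
  | cons c rest ih =>
    simp only [pvSplitD]
    split
    · intro p hp
      rcases List.mem_cons.mp hp with h | h
      · simp [h]
      · exact ih p h
    · rename_i hc
      cases hps : pvSplitD rest with
      | nil => exact absurd hps (pvSplitD_ne_nil rest)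
      | cons q qs =>
        intro p hp
        rcases List.mem_cons.mp hp with h | h
        · subst h
          have hq := ih q (by rw [hps]; exact List.mem_cons_self)
          intro hmem
          rcases List.mem_cons.mp hmem with h' | h'
          · exact hc h'.symm
          · exact hq h'
        · exact ih p (by rw [hps]; exact List.mem_cons_of_mem _ h)

lemma pvSplitD_join (l : List Char) : List.intercalate ['-'] (pvSplitD l) = l := by
  induction l with
  | nil => simp [pvSplitD, List.intercalate]
  | cons c rest ih =>
    simp only [pvSplitD]
    split
    · rename_i hc
      subst hc
      cases hps : pvSplitD rest with
      | nil => exact absurd hps (pvSplitD_ne_nil rest)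
      | cons q qs =>
        rw [hps] at ih
        simp [List.intercalate] at ih ⊢
        exact ih
    · cases hps : pvSplitD rest with
      | nil => exact absurd hps (pvSplitD_ne_nil rest)
      | cons q qs =>
        rw [hps] at ih
        cases qs with
        | nil => simp [List.intercalate] at ih ⊢; exact ih
        | cons r rs => simp [List.intercalate] at ih ⊢; exact ih

lemma pvSplitOn_go_eq (fuel : Nat) : ∀ (l cur : List Char) (acc : List (List Char)),
    l.length < fuel →
    PySem.Chars.splitOn.go ['-'] fuel l cur acc
      = acc.reverse ++ (pvSplitD l).modifyHead (cur.reverse ++ ·) := by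
  induction fuel with
  | zero => intro l cur acc h; omega
  | succ n ih =>
    intro l cur acc h
    cases l with
    | nil =>
      rw [PySem.Chars.splitOn.go]
      simp [pvSplitD]
      omega
    | cons c rest =>
      by_cases hc : c = '-'
      · subst hc
        rw [PySem.Chars.splitOn.go, if_pos (by simp [List.isPrefixOf])]
        simp only [List.length_cons, List.length_nil, List.drop_succ_cons, List.drop_zero]
        rw [ih rest [] (cur.reverse :: acc) (by simp at h; omega)]
        have hmod : (pvSplitD rest).modifyHead (fun x => [].reverse ++ x) = pvSplitD rest := by
          cases pvSplitD rest <;> simp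
        rw [hmod]
        simp [pvSplitD]
      · rw [PySem.Chars.splitOn.go, if_neg (by simp [List.isPrefixOf]; intro hh; exact absurd hh.symm hc)]
        rw [ih rest (c :: cur) acc (by simp at h; omega)]
        cases hps : pvSplitD rest with
        | nil => exact absurd hps (pvSplitD_ne_nil rest)
        | cons q qs =>
          simp [pvSplitD, hc, hps]

lemma pvSplitOn_eq (l : List Char) : PySem.Chars.splitOn l ['-'] = pvSplitD l := by
  rw [PySem.Chars.splitOn, pvSplitOn_go_eq (l.length + 1) l [] [] (by omega)]
  cases h : pvSplitD l with
  | nil => exact absurd h (pvSplitD_ne_nil l)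
  | cons p ps => simp

lemma pvJoinNil (xs : List (List Char)) : PySem.Chars.join [] xs = xs.flatten := by
  induction xs with
  | nil => rfl
  | cons x xs ih =>
    cases xs with
    | nil => simp [PySem.Chars.join, List.intercalate]
    | cons y ys =>
      simp only [PySem.Chars.join, List.intercalate] at ih ⊢
      simp [List.intersperse] at ih ⊢
      exact ih

lemma pvGoA_dashfree_append (p : List Char) (hp : '-' ∉ p) (t : List Char) :
    pvGoA (p ++ t) = p ++ pvGoA t := by
  induction p with
  | nil => simp
  | cons c p' ih =>
    have hc : ¬ c = '-' := fun h => hp (by simp [h])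
    rw [List.cons_append, pvGoA]
    simp only [if_neg hc]
    rw [ih (fun h => hp (List.mem_cons_of_mem _ h))]
    simp

lemma pvInterCC (p q : List Char) (ps : List (List Char)) :
    List.intercalate ['-'] (p :: q :: ps) = p ++ '-' :: List.intercalate ['-'] (q :: ps) := by
  simp [List.intercalate]

lemma pvBne (q : List Char) (hq : '-' ∉ q) : ∀ c ∈ q, (c != '-') = true := by
  intro c hcq
  simp only [bne_iff_ne, ne_eq]
  intro h; exact hq (h ▸ hcq)

lemma pvMain (n : Nat) : ∀ (p : List Char) (ps : List (List Char)),
    (p :: ps).length ≤ n → '-' ∉ p → (∀ q ∈ ps, '-' ∉ q) →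
    pvGoA (List.intercalate ['-'] (p :: ps)) = p ++ pvGoB true ps := by
  induction n with
  | zero => intro p ps h; simp at h
  | succ m ih =>
    intro p ps hlen hp hps
    cases ps with
    | nil =>
      have h1 : List.intercalate ['-'] [p] = p := by simp [List.intercalate]
      have h2 := pvGoA_dashfree_append p hp []
      simp at h2
      rw [h1, h2, pvGoB]
      simp [pvGoA]
    | cons q ps' =>
      have hq : '-' ∉ q := hps q List.mem_cons_self
      have hps' : ∀ r ∈ ps', '-' ∉ r := fun r hr => hps r (List.mem_cons_of_mem _ hr)
      rw [pvInterCC, pvGoA_dashfree_append p hp]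
      congr 1
      cases ps' with
      | nil =>
        -- rest = q dash-free: no closing dash is found
        have h1 : List.intercalate ['-'] [q] = q := by simp [List.intercalate]
        have hdrop : q.dropWhile (· != '-') = [] := by
          rw [List.dropWhile_eq_nil_iff]
          intro x hx; exact pvBne q hq x hx
        have h2 := pvGoA_dashfree_append q hq []
        simp at h2
        rw [h1, pvGoA]
        simp only [if_true]
        split
        · rename_i head after heq
          rw [hdrop] at heq
          cases heq
        · rw [h2]
          simp [pvGoA, pvGoB]
      | cons r ps'' =>
        have hR : List.intercalate ['-'] (q :: r :: ps'') = q ++ '-' :: List.intercalate ['-'] (r :: ps'') := pvInterCC q r ps''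
        have hdrop : (q ++ '-' :: List.intercalate ['-'] (r :: ps'')).dropWhile (· != '-') = '-' :: List.intercalate ['-'] (r :: ps'') := by
          rw [List.dropWhile_append_of_pos (pvBne q hq)]
          simp
        have htake : (q ++ '-' :: List.intercalate ['-'] (r :: ps'')).takeWhile (· != '-') = q := by
          rw [List.takeWhile_append_of_pos (pvBne q hq)]
          simp
        rw [hR, pvGoA]
        simp only [if_true, htake]
        split
        · rename_i head after heq
          rw [hdrop] at heq
          injection heq with heq1 heq2
          subst heq2
          by_cases hd : PySem.Chars.strIsdigit (PySem.Chars.strip q) = true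
          · rw [if_pos hd, ih r ps'' (by simp at hlen ⊢; omega) (hps' r List.mem_cons_self)
                (fun t ht => hps' t (List.mem_cons_of_mem _ ht))]
            rw [pvGoB, if_pos ⟨rfl, List.cons_ne_nil _ _, hd⟩, pvGoB]
            rw [if_neg (by rintro ⟨hfalse, -⟩; simp at hfalse)]
            simp
          · rw [if_neg hd, pvGoA_dashfree_append q hq]
            have hI : ('-' :: List.intercalate ['-'] (r :: ps'')) = List.intercalate ['-'] ([] :: r :: ps'') := by
              rw [pvInterCC]; simp
            rw [hI, ih [] (r :: ps'') (by simp at hlen ⊢; omega) (by simp)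
                (fun t ht => hps t (List.mem_cons_of_mem _ ht))]
            conv_rhs => rw [pvGoB]
            rw [if_neg (by rintro ⟨-, -, hdd⟩; exact hd hdd)]
            simp
        · rename_i heq
          rw [hdrop] at heq
          cases heq

lemma pvFoldB (parts : List (List Char)) (n : Nat) : ∀ (k : Nat) (pieces : List (List Char)) (pending : Bool),
    parts.length ≤ k + n →
    (((PySem.List.pyRange (k : Int) (parts.length : Int) 1).foldl (pvStepB parts) (pieces, pending)).1).flatten
      = pieces.flatten ++ pvGoB pending (parts.drop k) := by
  induction n with
  | zero =>
    intro k pieces pending h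
    have hnil : PySem.List.pyRange (k : Int) (parts.length : Int) 1 = [] := by
      simp [PySem.List.pyRange]; omega
    rw [hnil, List.drop_eq_nil_of_le (by omega)]
    simp [pvGoB]
  | succ m ih =>
    intro k pieces pending h
    by_cases hk : k < parts.length
    · rw [PySem.List.pyRange_one_cons (by exact_mod_cast hk)]
      have hcast : (k : Int) + 1 = ((k + 1 : Nat) : Int) := by push_cast; ring
      rw [List.foldl_cons]
      have hget : PySem.List.pyGetD parts (k : Int) [] = parts[k] := by
        rw [PySem.List.pyGetD_natCast]
        exact List.getD_eq_getElem _ _ hk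
      have hdrop : parts.drop k = parts[k] :: parts.drop (k + 1) := by
        rw [List.getElem_cons_drop]
      have hrest : (parts.drop (k+1) ≠ []) ↔ ((k : Int) < (parts.length : Int) - 1) := by
        rw [ne_eq, List.drop_eq_nil_iff]
        constructor
        · intro hh; omega
        · intro hh; push_cast at hh; omega
      by_cases hcond : (pending && decide ((k : Int) < (parts.length : Int) - 1)
          && PySem.Chars.strIsdigit (PySem.Chars.strip (PySem.List.pyGetD parts (k:Int) []))) = true
      · have hstep : pvStepB parts (pieces, pending) (k : Int) = (pieces, false) := by
          rw [pvStepB, if_pos hcond]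
        rw [hstep, hcast, ih (k+1) pieces false (by omega)]
        simp only [Bool.and_eq_true, decide_eq_true_eq] at hcond
        obtain ⟨⟨hpend, hlt⟩, hdig⟩ := hcond
        rw [hget] at hdig
        rw [hdrop]
        conv_rhs => rw [pvGoB]
        rw [if_pos ⟨by simp [hpend], hrest.mpr hlt, hdig⟩]
      · have hstep : pvStepB parts (pieces, pending) (k : Int) =
            ((if pending then pieces ++ [['-']] else pieces) ++ [parts[k]], true) := by
          rw [pvStepB, if_neg hcond, hget]
        rw [hstep, hcast, ih (k+1) _ true (by omega)]
        simp only [Bool.and_eq_true, decide_eq_true_eq, not_and] at hcond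
        have hno : ¬ (pending = true ∧ parts.drop (k+1) ≠ [] ∧ PySem.Chars.strIsdigit (PySem.Chars.strip parts[k]) = true) := by
          rintro ⟨h1, h2, h3⟩
          exact hcond ⟨h1, hrest.mp h2⟩ (by rw [hget]; exact h3)
        rw [hdrop]
        conv_rhs => rw [pvGoB]
        rw [if_neg hno]
        by_cases hpend : pending = true <;>
          simp [hpend, List.flatten_append]
    · have hnil : PySem.List.pyRange (k : Int) (parts.length : Int) 1 = [] := by
        simp [PySem.List.pyRange]; omega
      rw [hnil, List.drop_eq_nil_of_le (by omega)]
      simp [pvGoB]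

-- ===== VERDICT (by name: the statement is the Claim_ definition above) =====
theorem remove_dash_number_dash_spec : Claim_equal_remove_dash_number_dash := by
  intro line _
  unfold Spec_remove_dash_number_dash remove_dash_number_dash remove_dash_number_dash_alt
  simp only [pvSplitOn_eq, pvJoinNil]
  cases hps : pvSplitD line.toList with
  | nil => exact absurd hps (pvSplitD_ne_nil _)
  | cons p ps =>
    have hf := pvFoldB (p :: ps) (p :: ps).length 1 [PySem.List.pyGetD (p :: ps) 0 []] true (by omega)
    norm_num at hf ⊢
    rw [hf]
    have hA : pvGoA line.toList = p ++ pvGoB true ps := by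
      rw [← pvSplitD_join line.toList, hps]
      exact pvMain (p :: ps).length p ps le_rfl
        (pvSplitD_dashfree line.toList p (by rw [hps]; exact List.mem_cons_self))
        (fun q hq => pvSplitD_dashfree line.toList q (by rw [hps]; exact List.mem_cons_of_mem _ hq))
    rw [hA]
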